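-- pv_equiv track=rewrite | github.com/sonaiso/Eqratech_Hussein_Hiyassat_Project | src/orchestrator/dependency_syntax/builder.py | _first_verb_index
-- ===== SOURCE A (Python) =====
-- from typing import Any, Dict, List, Optional, Tuple
--
-- def _is_verb_like(kind: str, pos_hint: str, l8b_profile: Optional[Dict]) -> bool:
--     if l8b_profile:
--         return True
--     k = (kind or "").strip().lower()
--     p = (pos_hint or "").strip().lower()
--     return k in ("verb", "فعل") or p in ("verb", "فعل") or "verb" in p
--
-- def _first_verb_index(
--     tokens: List[str],
--     words5: List[Dict],
--     nodes: List[Dict],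
--     l8b_map: Dict[int, Dict[str, Any]],
-- ) -> Optional[int]:
--     """First token index that is a verb (L8B or L5/L10B pos_hint). Fallback: index 0 for verbal."""
--     word_to_kind: Dict[str, str] = {}
--     for w in words5:
--         word_to_kind[(w.get("word") or "").strip()] = (w.get("kind") or "").strip()
--     node_by_id: Dict[str, Dict] = {n.get("token_id"): n for n in nodes if n.get("token_id") is not None}
--     for i, surface in enumerate(tokens):
--         if l8b_map.get(i):
--             return i
--         kind = word_to_kind.get((surface or "").strip(), "")
--         pos_hint = (node_by_id.get(str(i)) or {}).get("pos_hint") or ""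
--         if _is_verb_like(kind, pos_hint, None):
--             return i
--     return 0 if tokens else None
-- ===== SOURCE B (Python) =====
-- from typing import Any, Dict, List, Optional
--
--
-- def _hint_verbish(p: str) -> bool:
--     p = p.strip().lower()
--     return p in ("verb", "فعل") or "verb" in p
--
--
-- def _first_verb_index(
--     tokens: List[str],
--     words5: List[Dict],
--     nodes: List[Dict],
--     l8b_map: Dict[int, Dict[str, Any]],
-- ) -> Optional[int]:
--     if not tokens:
--         return None
--     n = len(tokens)
--     # last occurrence wins, as in a dict built by overwriting inserts
--     word_to_kind: Dict[str, str] = {}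
--     for w in words5:
--         word_to_kind[(w.get("word") or "").strip()] = (w.get("kind") or "").strip()
--     verb_words = {w for w, k in word_to_kind.items() if k.strip().lower() in ("verb", "فعل")}
--     hint_by_id: Dict[str, str] = {}
--     for nd in nodes:
--         tid = nd.get("token_id")
--         if tid is not None:
--             hint_by_id[tid] = nd.get("pos_hint") or ""
--     # first hit of each independent evidence source, then the least of those
--     l8b_hits = [i for i in range(n) if l8b_map.get(i)]
--     word_hits = [i for i in range(n) if (tokens[i] or "").strip() in verb_words]
--     hint_hits = [i for i in range(n) if _hint_verbish(hint_by_id.get(str(i), ""))]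
--     firsts = [h[0] for h in (l8b_hits, word_hits, hint_hits) if h]
--     return min(firsts) if firsts else 0
-- ===== Notes on version B (the rewrite author's own statement) =====
-- stated objective: alternative
-- what changed: Instead of a single early-return scan that combines all evidence per token via _is_verb_like, B precomputes the set of verb-kind words, collects the hit indices of each of the three evidence sources (l8b, word kind, pos_hint) in independent passes over the token range, and returns the minimum of the three first hits (0 if none, None if no tokens).
import Mathlib
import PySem

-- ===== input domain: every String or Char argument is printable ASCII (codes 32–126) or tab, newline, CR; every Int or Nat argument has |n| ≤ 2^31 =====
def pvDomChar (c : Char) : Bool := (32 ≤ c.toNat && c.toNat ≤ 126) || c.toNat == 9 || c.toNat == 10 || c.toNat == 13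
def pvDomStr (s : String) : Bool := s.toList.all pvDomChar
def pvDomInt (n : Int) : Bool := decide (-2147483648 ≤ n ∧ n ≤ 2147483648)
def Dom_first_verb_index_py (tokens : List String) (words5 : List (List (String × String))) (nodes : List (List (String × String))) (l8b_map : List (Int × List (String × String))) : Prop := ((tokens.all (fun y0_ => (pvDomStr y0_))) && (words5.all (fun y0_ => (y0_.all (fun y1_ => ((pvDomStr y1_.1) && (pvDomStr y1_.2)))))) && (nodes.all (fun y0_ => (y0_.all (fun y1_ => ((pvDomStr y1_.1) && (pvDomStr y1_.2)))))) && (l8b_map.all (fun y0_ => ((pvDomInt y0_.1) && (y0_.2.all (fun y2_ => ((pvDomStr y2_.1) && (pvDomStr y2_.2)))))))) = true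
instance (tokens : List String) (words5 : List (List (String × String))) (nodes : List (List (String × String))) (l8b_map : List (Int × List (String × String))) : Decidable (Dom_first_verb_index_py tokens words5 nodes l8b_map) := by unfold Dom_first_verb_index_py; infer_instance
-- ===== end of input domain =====

-- B replaces A's early-return combined scan by three independent hit-index passes (l8b / verb-kind word set / pos_hint) over the token range, returning the least first hit; same return value.


-- shared helpers (same-module context both Pythons use)
-- d.get(k): parameter dicts are association lists; lookup = first match
def pvGet (d : List (String × String)) (k : String) : Option String :=
  (d.find? (fun p => p.1 == k)).map (·.2)

-- truthiness of l8b_map.get(i): a present, non-empty dict value (used by both Pythons)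
def pvL8bTruthy (l8b_map : List (Int × List (String × String))) (i : Nat) : Bool :=
  match l8b_map.find? (fun p => p.1 == (i : Int)) with
  | some p => !p.2.isEmpty
  | none => false

-- word_to_kind: built by overwriting inserts (last duplicate wins); both Pythons build it this way
def pvWordToKind (words5 : List (List (String × String))) : PySem.Dict String String :=
  words5.foldl
    (fun d w => d.insert (PySem.Str.strip ((pvGet w "word").getD ""))
                         (PySem.Str.strip ((pvGet w "kind").getD ""))) PySem.Dict.empty

-- ===== PORT A =====
-- _is_verb_like(kind, pos_hint, l8b_profile) with l8b_profile's truthiness as a Bool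
def pvIsVerbLike (kind pos_hint : String) (l8b_profile : Bool) : Bool :=
  if l8b_profile then true
  else
    let k := PySem.Str.lower (PySem.Str.strip kind)
    let p := PySem.Str.lower (PySem.Str.strip pos_hint)
    (k == "verb" || k == "فعل") || (p == "verb" || p == "فعل") || PySem.Str.isIn "verb" p

-- node_by_id: {n.get("token_id"): n for n in nodes if n.get("token_id") is not None}
def pvNodeById (nodes : List (List (String × String))) : PySem.Dict String (List (String × String)) :=
  nodes.foldl
    (fun d n => match pvGet n "token_id" with
                | some tid => d.insert tid n
                | none => d) PySem.Dict.empty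

def pvLoopA (word_to_kind : PySem.Dict String String)
    (node_by_id : PySem.Dict String (List (String × String)))
    (l8b_map : List (Int × List (String × String))) :
    List String → Nat → Option Int
  | [], _ => none
  | surface :: rest, i =>
    if pvL8bTruthy l8b_map i then some (i : Int)
    else
      let kind := (word_to_kind.get? (PySem.Str.strip surface)).getD ""
      let pos_hint :=
        match node_by_id.get? (PySem.Int.toStr (i : Int)) with
        | some n => (pvGet n "pos_hint").getD ""
        | none => ""
      if pvIsVerbLike kind pos_hint false then some (i : Int)
      else pvLoopA word_to_kind node_by_id l8b_map rest (i + 1)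

def first_verb_index_py (tokens : List String) (words5 : List (List (String × String))) (nodes : List (List (String × String))) (l8b_map : List (Int × List (String × String))) : Option Int :=
  match pvLoopA (pvWordToKind words5) (pvNodeById nodes) l8b_map tokens 0 with
  | some r => some r
  | none => if tokens.isEmpty then none else some 0

-- ===== PORT B =====
-- _hint_verbish(p)
def pvHintVerbish (p : String) : Bool :=
  let q := PySem.Str.lower (PySem.Str.strip p)
  (q == "verb" || q == "فعل") || PySem.Str.isIn "verb" q

-- {w for w, k in word_to_kind.items() if k.strip().lower() in ("verb", "فعل")}
def pvVerbWords (word_to_kind : PySem.Dict String String) : PySem.Set String :=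
  PySem.Set.ofList
    ((word_to_kind.items.filter
        (fun p => let k := PySem.Str.lower (PySem.Str.strip p.2)
                  k == "verb" || k == "فعل")).map (·.1))

-- hint_by_id: token_id -> (pos_hint or ""), last duplicate wins
def pvHintById (nodes : List (List (String × String))) : PySem.Dict String String :=
  nodes.foldl
    (fun d n => match pvGet n "token_id" with
                | some tid => d.insert tid ((pvGet n "pos_hint").getD "")
                | none => d) PySem.Dict.empty

def first_verb_index_py_alt (tokens : List String) (words5 : List (List (String × String))) (nodes : List (List (String × String))) (l8b_map : List (Int × List (String × String))) : Option Int :=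
  if tokens.isEmpty then none
  else
    let n := tokens.length
    let verb_words := pvVerbWords (pvWordToKind words5)
    let hint_by_id := pvHintById nodes
    let l8b_hits := (List.range n).filter (fun i => pvL8bTruthy l8b_map i)
    let word_hits := (List.range n).filter
      (fun i => verb_words.contains (PySem.Str.strip ((tokens[i]?).getD "")))
    let hint_hits := (List.range n).filter
      (fun i : Nat => pvHintVerbish ((hint_by_id.get? (PySem.Int.toStr (i : Int))).getD ""))
    let firsts := [l8b_hits, word_hits, hint_hits].filterMap List.head?
    match firsts.min? with
    | some m => some (m : Int)
    | none => some 0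

-- ===== PRECONDITION & SPEC =====
def Spec_first_verb_index_py (tokens : List String) (words5 : List (List (String × String))) (nodes : List (List (String × String))) (l8b_map : List (Int × List (String × String))) (out : Option Int) : Prop := out = first_verb_index_py_alt tokens words5 nodes l8b_map
instance (tokens : List String) (words5 : List (List (String × String))) (nodes : List (List (String × String))) (l8b_map : List (Int × List (String × String))) (out : Option Int) : Decidable (Spec_first_verb_index_py tokens words5 nodes l8b_map out) := by unfold Spec_first_verb_index_py; infer_instance

-- ===== CLAIM (what is proved, stated in full; the proofs are below) =====
def Claim_equal_first_verb_index_py : Prop := ∀ (tokens : List String) (words5 : List (List (String × String))) (nodes : List (List (String × String))) (l8b_map : List (Int × List (String × String))), Dom_first_verb_index_py tokens words5 nodes l8b_map → Spec_first_verb_index_py tokens words5 nodes l8b_map (first_verb_index_py tokens words5 nodes l8b_map)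

-- ===== LEMMAS AND PROOFS =====

-- the per-index test of A's loop, phrased as B computes it (proof-only definition)
def pvQ (tokens : List String) (words5 : List (List (String × String)))
    (nodes : List (List (String × String))) (l8b_map : List (Int × List (String × String)))
    (i : Nat) : Bool :=
  pvL8bTruthy l8b_map i
  || (pvVerbWords (pvWordToKind words5)).contains (PySem.Str.strip ((tokens[i]?).getD ""))
  || pvHintVerbish (((pvHintById nodes).get? (PySem.Int.toStr (i : Int))).getD "")

theorem pvWordToKind_nodup (words5 : List (List (String × String))) :
    (pvWordToKind words5).keys.Nodup := by
  unfold pvWordToKind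
  exact PySem.Dict.nodup_keys_foldl_insert_key words5
    (fun w => PySem.Str.strip ((pvGet w "word").getD ""))
    (fun d w => PySem.Str.strip ((pvGet w "kind").getD ""))
    PySem.Dict.empty PySem.Dict.nodup_keys_empty

-- A's kind test on the dict lookup equals membership in B's verb_words set
theorem pvKind_mem (words5 : List (List (String × String))) (key : String) :
    (let k := PySem.Str.lower (PySem.Str.strip (((pvWordToKind words5).get? key).getD ""))
     (k == "verb" || k == "فعل"))
      = (pvVerbWords (pvWordToKind words5)).contains key := by
  have hnd := pvWordToKind_nodup words5
  rw [Bool.eq_iff_iff]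
  simp only [pvVerbWords, PySem.Set.contains, List.contains_iff_mem, PySem.Set.mem_ofList,
    List.mem_map, List.mem_filter]
  constructor
  · intro hk
    cases h : (pvWordToKind words5).get? key with
    | none => rw [h] at hk; exact absurd hk (by decide)
    | some v =>
      rw [h] at hk
      exact ⟨(key, v), ⟨PySem.Dict.mem_items_of_get?_eq_some _ h, by simpa using hk⟩, rfl⟩
  · rintro ⟨⟨k', v⟩, ⟨hmem, hP⟩, hk⟩
    subst hk
    have := PySem.Dict.get?_of_mem_items _ hmem hnd
    rw [this]
    simpa using hP

-- B's hint_by_id lookup tracks A's node_by_id lookup through pos_hint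
theorem pvHint_aux (tid : String) :
    ∀ (ns : List (List (String × String))) (dh : PySem.Dict String String)
      (dn : PySem.Dict String (List (String × String))),
      dh.get? tid = (dn.get? tid).map (fun n => (pvGet n "pos_hint").getD "") →
      (ns.foldl (fun d n => match pvGet n "token_id" with
                            | some t => d.insert t ((pvGet n "pos_hint").getD "")
                            | none => d) dh).get? tid
        = ((ns.foldl (fun d n => match pvGet n "token_id" with
                                 | some t => d.insert t n
                                 | none => d) dn).get? tid).map
            (fun n => (pvGet n "pos_hint").getD "") := by
  intro ns
  induction ns with
  | nil => intro dh dn h; simpa using h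
  | cons n rest ih =>
    intro dh dn h
    simp only [List.foldl]
    cases ht : pvGet n "token_id" with
    | none => exact ih dh dn h
    | some t =>
      apply ih
      by_cases hk : t = tid
      · subst hk; simp [PySem.Dict.get?_insert_self]
      · rw [PySem.Dict.get?_insert_of_ne _ _ (fun he => hk he.symm),
            PySem.Dict.get?_insert_of_ne _ _ (fun he => hk he.symm)]
        exact h

theorem pvHint_eq (nodes : List (List (String × String))) (tid : String) :
    ((pvHintById nodes).get? tid).getD ""
      = (match (pvNodeById nodes).get? tid with
         | some n => (pvGet n "pos_hint").getD ""
         | none => "") := by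
  have h := pvHint_aux tid nodes PySem.Dict.empty PySem.Dict.empty (by simp)
  unfold pvHintById pvNodeById
  rw [h]
  cases (nodes.foldl (fun d n => match pvGet n "token_id" with
                                 | some t => d.insert t n
                                 | none => d) PySem.Dict.empty).get? tid <;> rfl

-- A's combined _is_verb_like test splits into the kind test and the hint test
theorem pvIsVerbLike_split (kind pos_hint : String) :
    pvIsVerbLike kind pos_hint false
      = ((let k := PySem.Str.lower (PySem.Str.strip kind)
          (k == "verb" || k == "فعل")) || pvHintVerbish pos_hint) := by
  simp [pvIsVerbLike, pvHintVerbish, Bool.or_assoc]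

-- A's loop is the first index in [i, i + |xs|) satisfying pvQ
theorem pvLoopA_find (tokens : List String) (words5 : List (List (String × String)))
    (nodes : List (List (String × String))) (l8b_map : List (Int × List (String × String))) :
    ∀ (xs : List String) (i : Nat), (∀ p, p < xs.length → xs[p]? = tokens[i + p]?) →
      pvLoopA (pvWordToKind words5) (pvNodeById nodes) l8b_map xs i
        = ((List.range' i xs.length).find? (pvQ tokens words5 nodes l8b_map)).map
            (fun j => (j : Int)) := by
  intro xs
  induction xs with
  | nil => intro i _; rfl
  | cons surface rest ih =>
    intro i h
    have h0 : tokens[i]? = some surface := by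
      have := h 0 (by simp)
      simpa using this.symm
    have hsurf : (tokens[i]?).getD "" = surface := by rw [h0]; rfl
    have hrest : ∀ p, p < rest.length → rest[p]? = tokens[(i + 1) + p]? := by
      intro p hp
      have := h (p + 1) (by simpa using Nat.succ_lt_succ hp)
      simpa [Nat.add_assoc, Nat.add_comm 1 p] using this
    have hQ : pvQ tokens words5 nodes l8b_map i
        = (pvL8bTruthy l8b_map i
           || pvIsVerbLike (((pvWordToKind words5).get? (PySem.Str.strip surface)).getD "")
                (match (pvNodeById nodes).get? (PySem.Int.toStr (i : Int)) with
                 | some n => (pvGet n "pos_hint").getD ""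
                 | none => "") false) := by
      rw [pvIsVerbLike_split, pvQ, hsurf, pvKind_mem, pvHint_eq, Bool.or_assoc]
    show (if pvL8bTruthy l8b_map i then some (i : Int)
          else if pvIsVerbLike _ _ false then some (i : Int)
          else pvLoopA (pvWordToKind words5) (pvNodeById nodes) l8b_map rest (i + 1)) = _
    rw [List.length_cons, List.range'_succ]
    cases hb : pvL8bTruthy l8b_map i with
    | true =>
      have : pvQ tokens words5 nodes l8b_map i = true := by rw [hQ, hb]; rfl
      simp [this]
    | false =>
      cases hv : pvIsVerbLike (((pvWordToKind words5).get? (PySem.Str.strip surface)).getD "")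
          (match (pvNodeById nodes).get? (PySem.Int.toStr (i : Int)) with
           | some n => (pvGet n "pos_hint").getD ""
           | none => "") false with
      | true =>
        have : pvQ tokens words5 nodes l8b_map i = true := by rw [hQ, hb, hv]; rfl
        simp [this]
      | false =>
        have : pvQ tokens words5 nodes l8b_map i = false := by rw [hQ, hb, hv]; rfl
        simp only [List.find?_cons, this]
        exact ih (i + 1) hrest

-- min of the first hits found in a strictly increasing list = first hit of the disjunction
theorem pvMin_of_mem_le (os : List (Option Nat)) (x : Nat)
    (hmem : some x ∈ os) (hle : ∀ y, some y ∈ os → x ≤ y) :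
    (os.filterMap id).min? = some x := by
  rw [List.min?_eq_some_iff]
  constructor
  · simp only [List.mem_filterMap, id]
    exact ⟨some x, hmem, rfl⟩
  · intro b hb
    simp only [List.mem_filterMap, id] at hb
    obtain ⟨o, ho, rfl⟩ := hb
    exact hle b ho

theorem pvMinThree (p1 p2 p3 : Nat → Bool) :
    ∀ (L : List Nat), L.Pairwise (· < ·) →
      ([L.find? p1, L.find? p2, L.find? p3].filterMap id).min?
        = L.find? (fun i => p1 i || p2 i || p3 i) := by
  intro L
  induction L with
  | nil => intro _; rfl
  | cons x rest ih =>
    intro hpw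
    have hrest : rest.Pairwise (· < ·) := hpw.of_cons
    have hlt : ∀ y ∈ rest, x < y := fun y hy => (List.pairwise_cons.mp hpw).1 y hy
    have slot : ∀ (p : Nat → Bool) (y : Nat),
        (x :: rest).find? p = some y → x ≤ y := by
      intro p y hy
      rw [List.find?_cons] at hy
      split at hy
      · exact Nat.le_of_eq (Option.some.inj hy)
      · exact Nat.le_of_lt (hlt y (List.mem_of_find?_eq_some hy))
    cases hq : (p1 x || p2 x || p3 x) with
    | false =>
      have h1 : p1 x = false := by revert hq; cases p1 x <;> simp
      have h2 : p2 x = false := by revert hq; cases p2 x <;> simp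
      have h3 : p3 x = false := by revert hq; cases p3 x <;> simp
      rw [List.find?_cons_of_neg (by simp [h1]),
          List.find?_cons_of_neg (by simp [h2]),
          List.find?_cons_of_neg (by simp [h3]),
          List.find?_cons_of_neg (by simp [hq])]
      exact ih hrest
    | true =>
      have hfq : List.find? (fun i => p1 i || p2 i || p3 i) (x :: rest) = some x :=
        List.find?_cons_of_pos (by simpa using hq)
      rw [hfq]
      apply pvMin_of_mem_le
      · have h123 : p1 x = true ∨ p2 x = true ∨ p3 x = true := by
          rcases Bool.or_eq_true_iff.mp hq with h | h3
          · rcases Bool.or_eq_true_iff.mp h with h1 | h2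
            · exact Or.inl h1
            · exact Or.inr (Or.inl h2)
          · exact Or.inr (Or.inr h3)
        rcases h123 with h | h | h
        · have : (x :: rest).find? p1 = some x := List.find?_cons_of_pos h
          simp [this]
        · have : (x :: rest).find? p2 = some x := List.find?_cons_of_pos h
          simp [this]
        · have : (x :: rest).find? p3 = some x := List.find?_cons_of_pos h
          simp [this]
      · intro y hy
        simp only [List.mem_cons, List.not_mem_nil, or_false] at hy
        rcases hy with hy | hy | hy
        · exact slot p1 y hy.symm
        · exact slot p2 y hy.symm
        · exact slot p3 y hy.symm

-- ===== VERDICT (by name: the statement is the Claim_ definition above) =====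
theorem first_verb_index_py_spec : Claim_equal_first_verb_index_py := by
  intro tokens words5 nodes l8b_map _
  unfold Spec_first_verb_index_py first_verb_index_py
  cases hte : tokens.isEmpty with
  | true =>
    have : tokens = [] := List.isEmpty_iff.mp hte
    subst this
    rfl
  | false =>
    have hA := pvLoopA_find tokens words5 nodes l8b_map tokens 0
      (by intro p hp; simp)
    rw [List.range_eq_range'.symm] at hA
    have hmap : ([(List.range tokens.length).filter (fun i => pvL8bTruthy l8b_map i),
                  (List.range tokens.length).filter
                    (fun i => (pvVerbWords (pvWordToKind words5)).contains
                        (PySem.Str.strip ((tokens[i]?).getD ""))),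
                  (List.range tokens.length).filter
                    (fun i : Nat => pvHintVerbish
                        (((pvHintById nodes).get? (PySem.Int.toStr (i : Int))).getD ""))].filterMap
                  List.head?).min?
        = (List.range tokens.length).find? (pvQ tokens words5 nodes l8b_map) := by
      rw [show (List.filterMap List.head?
            [(List.range tokens.length).filter (fun i => pvL8bTruthy l8b_map i),
             (List.range tokens.length).filter
               (fun i => (pvVerbWords (pvWordToKind words5)).contains
                   (PySem.Str.strip ((tokens[i]?).getD ""))),
             (List.range tokens.length).filter
               (fun i : Nat => pvHintVerbish
                   (((pvHintById nodes).get? (PySem.Int.toStr (i : Int))).getD ""))])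
          = List.filterMap id
            [((List.range tokens.length).filter (fun i => pvL8bTruthy l8b_map i)).head?,
             ((List.range tokens.length).filter
               (fun i => (pvVerbWords (pvWordToKind words5)).contains
                   (PySem.Str.strip ((tokens[i]?).getD "")))).head?,
             ((List.range tokens.length).filter
               (fun i : Nat => pvHintVerbish
                   (((pvHintById nodes).get? (PySem.Int.toStr (i : Int))).getD ""))).head?]
          from by simp [List.filterMap]]
      simp only [List.head?_filter]
      exact pvMinThree _ _ _ (List.range tokens.length) List.pairwise_lt_range
    have hB : first_verb_index_py_alt tokens words5 nodes l8b_map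
        = (match ([(List.range tokens.length).filter (fun i => pvL8bTruthy l8b_map i),
                   (List.range tokens.length).filter
                     (fun i => (pvVerbWords (pvWordToKind words5)).contains
                         (PySem.Str.strip ((tokens[i]?).getD ""))),
                   (List.range tokens.length).filter
                     (fun i : Nat => pvHintVerbish
                         (((pvHintById nodes).get? (PySem.Int.toStr (i : Int))).getD ""))].filterMap
                   List.head?).min? with
           | some m => some (m : Int)
           | none => some 0) := by
      unfold first_verb_index_py_alt
      rw [if_neg (by simp [hte])]
    rw [hmap] at hB
    rw [hB, hA]
    cases (List.range tokens.length).find? (pvQ tokens words5 nodes l8b_map) <;> rfl
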